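-- pv_equiv track=rewrite | github.com/pypi-data/pypi-mirror-372 | packages/otsec/otsec-0.1.1-py3-none-any.whl/otsec/core/discovery.py | classify
-- ===== SOURCE A (Python) =====
-- from typing import List, Dict
--
-- def classify(open_ports: List[int]) -> str:
--     """Quick & simple proto hint from open ports (priority order)."""
--     if 502 in open_ports:   return "modbus"
--     if 20000 in open_ports: return "dnp3"
--     if 47808 in open_ports: return "bacnet"
--     if 44818 in open_ports: return "ethernet/ip"
--     if 1883 in open_ports:  return "mqtt"
--     if 8883 in open_ports:  return "mqtts"
--     if 554 in open_ports:   return "camera/rtsp"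
--     if any(p in open_ports for p in (443, 8443)): return "https/iot"
--     if any(p in open_ports for p in (80, 81, 8000, 8080)): return "http/iot"
--     if 23 in open_ports:    return "telnet"
--     if 22 in open_ports:    return "ssh"
--     return "unknown"
-- ===== SOURCE B (Python) =====
-- # Single pass over the open ports: map each port to a numeric priority rank
-- # via one dict and keep the minimum rank seen; index a label table at the end.
-- PRIORITY = {
--     502: 0, 20000: 1, 47808: 2, 44818: 3, 1883: 4, 8883: 5, 554: 6,
--     443: 7, 8443: 7,
--     80: 8, 81: 8, 8000: 8, 8080: 8,
--     23: 9, 22: 10,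
-- }
-- LABELS = ["modbus", "dnp3", "bacnet", "ethernet/ip", "mqtt", "mqtts",
--           "camera/rtsp", "https/iot", "http/iot", "telnet", "ssh"]
--
-- def classify(open_ports):
--     """Quick & simple proto hint from open ports (priority order)."""
--     best = None
--     for p in open_ports:
--         r = PRIORITY.get(p)
--         if r is not None and (best is None or r < best):
--             best = r
--     return "unknown" if best is None else LABELS[best]
-- ===== Notes on version B (the rewrite author's own statement) =====
-- stated objective: alternative
-- what changed: Instead of testing each protocol's port group against the list in priority order, B makes a single pass over the open ports, mapping each port to a numeric priority rank via one dict and keeping the minimum rank seen, then indexes a label table by that rank.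
import Mathlib
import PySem

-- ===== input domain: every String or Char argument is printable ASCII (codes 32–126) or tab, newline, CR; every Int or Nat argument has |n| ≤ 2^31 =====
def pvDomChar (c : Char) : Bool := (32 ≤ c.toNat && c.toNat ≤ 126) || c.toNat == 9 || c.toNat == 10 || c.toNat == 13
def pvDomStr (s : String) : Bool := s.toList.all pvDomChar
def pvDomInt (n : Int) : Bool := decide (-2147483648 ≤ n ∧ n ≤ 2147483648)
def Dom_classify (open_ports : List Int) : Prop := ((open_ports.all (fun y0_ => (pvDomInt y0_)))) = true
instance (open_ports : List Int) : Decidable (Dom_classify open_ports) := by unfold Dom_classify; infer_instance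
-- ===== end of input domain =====

-- B replaces A's priority-ordered rule tests with one pass over the ports keeping the minimum priority rank (objective: alternative).

-- ===== PORT A =====
def classify (open_ports : List Int) : String :=
  if (502 : Int) ∈ open_ports then "modbus"
  else if (20000 : Int) ∈ open_ports then "dnp3"
  else if (47808 : Int) ∈ open_ports then "bacnet"
  else if (44818 : Int) ∈ open_ports then "ethernet/ip"
  else if (1883 : Int) ∈ open_ports then "mqtt"
  else if (8883 : Int) ∈ open_ports then "mqtts"
  else if (554 : Int) ∈ open_ports then "camera/rtsp"
  else if ([443, 8443] : List Int).any (fun p => open_ports.contains p) then "https/iot"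
  else if ([80, 81, 8000, 8080] : List Int).any (fun p => open_ports.contains p) then "http/iot"
  else if (23 : Int) ∈ open_ports then "telnet"
  else if (22 : Int) ∈ open_ports then "ssh"
  else "unknown"

-- ===== PORT B =====
def priorityDict : PySem.Dict Int Int :=
  PySem.Dict.ofList [(502, 0), (20000, 1), (47808, 2), (44818, 3), (1883, 4), (8883, 5),
    (554, 6), (443, 7), (8443, 7), (80, 8), (81, 8), (8000, 8), (8080, 8), (23, 9), (22, 10)]

def classLabels : List String :=
  ["modbus", "dnp3", "bacnet", "ethernet/ip", "mqtt", "mqtts", "camera/rtsp",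
   "https/iot", "http/iot", "telnet", "ssh"]

-- 'r = PRIORITY.get(p); if r is not None and (best is None or r < best): best = r'
def rankStep (best : Option Int) (p : Int) : Option Int :=
  match priorityDict.get? p with
  | none => best
  | some r =>
    match best with
    | none => some r
    | some b => if r < b then some r else best

def classify_alt (open_ports : List Int) : String :=
  match open_ports.foldl rankStep none with
  | none => "unknown"
  | some r =>
    match PySem.List.pyGet? classLabels r with
    | some s => s
    | none => ""   -- unreachable: every rank stored is 0..10 (Python would raise IndexError here)

-- ===== PRECONDITION & SPEC =====
def Spec_classify (open_ports : List Int) (out : String) : Prop := out = classify_alt open_ports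
instance (open_ports : List Int) (out : String) : Decidable (Spec_classify open_ports out) := by unfold Spec_classify; infer_instance

-- ===== CLAIM (what is proved, stated in full; the proofs are below) =====
def Claim_equal_classify : Prop := ∀ (open_ports : List Int), Dom_classify open_ports → Spec_classify open_ports (classify open_ports)

-- ===== LEMMAS AND PROOFS =====

-- which (port, rank) pairs the priority dict contains
set_option maxHeartbeats 1000000 in
theorem rank_mem {q r : Int} (h : priorityDict.get? q = some r) :
    (q = 502 ∧ r = 0) ∨ (q = 20000 ∧ r = 1) ∨ (q = 47808 ∧ r = 2) ∨ (q = 44818 ∧ r = 3) ∨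
    (q = 1883 ∧ r = 4) ∨ (q = 8883 ∧ r = 5) ∨ (q = 554 ∧ r = 6) ∨
    (q = 443 ∧ r = 7) ∨ (q = 8443 ∧ r = 7) ∨
    (q = 80 ∧ r = 8) ∨ (q = 81 ∧ r = 8) ∨ (q = 8000 ∧ r = 8) ∨ (q = 8080 ∧ r = 8) ∨
    (q = 23 ∧ r = 9) ∨ (q = 22 ∧ r = 10) := by
  have e : priorityDict = PySem.Dict.mk [(502, 0), (20000, 1), (47808, 2), (44818, 3),
      (1883, 4), (8883, 5), (554, 6), (443, 7), (8443, 7), (80, 8), (81, 8), (8000, 8),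
      (8080, 8), (23, 9), (22, 10)] := by rfl
  have hm := PySem.Dict.mem_items_of_get?_eq_some priorityDict h
  rw [e] at hm
  simp only [List.mem_cons, List.not_mem_nil, or_false, Prod.mk.injEq] at hm
  omega

-- combining two partial minima
def omin : Option Int → Option Int → Option Int
  | none, y => y
  | some a, none => some a
  | some a, some b => some (min a b)

theorem rankStep_eq_omin (best : Option Int) (p : Int) :
    rankStep best p = omin best (priorityDict.get? p) := by
  unfold rankStep omin
  cases priorityDict.get? p with
  | none => cases best <;> rfl
  | some r =>
    cases best with
    | none => rfl
    | some b => simp only [min_def]; split_ifs <;> simp_all <;> omega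

theorem omin_assoc (a b c : Option Int) : omin (omin a b) c = omin a (omin b c) := by
  cases a <;> cases b <;> cases c <;> simp [omin, min_assoc]

theorem foldl_rankStep_omin (xs : List Int) : ∀ acc : Option Int,
    xs.foldl rankStep acc = omin acc (xs.foldl rankStep none) := by
  induction xs with
  | nil => intro acc; cases acc <;> rfl
  | cons p xs ih =>
    intro acc
    simp only [List.foldl_cons]
    rw [ih (rankStep acc p), ih (rankStep none p), rankStep_eq_omin, rankStep_eq_omin,
      omin_assoc]
    rfl

theorem omin_eq_none_iff (a b : Option Int) : omin a b = none ↔ a = none ∧ b = none := by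
  cases a <;> cases b <;> simp [omin]

theorem foldl_cons_omin (p : Int) (xs : List Int) :
    (p :: xs).foldl rankStep none = omin (priorityDict.get? p) (xs.foldl rankStep none) := by
  rw [List.foldl_cons, foldl_rankStep_omin, rankStep_eq_omin]
  rfl

theorem foldl_none_iff (xs : List Int) :
    xs.foldl rankStep none = none ↔ ∀ q ∈ xs, priorityDict.get? q = none := by
  induction xs with
  | nil => simp
  | cons p xs ih =>
    rw [foldl_cons_omin, omin_eq_none_iff, ih]
    simp [List.forall_mem_cons]

theorem foldl_rankStep_bounds (xs : List Int) {r : Int}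
    (h : xs.foldl rankStep none = some r) :
    (∃ p ∈ xs, priorityDict.get? p = some r) ∧
    (∀ q ∈ xs, ∀ r', priorityDict.get? q = some r' → r ≤ r') := by
  induction xs generalizing r with
  | nil => simp at h
  | cons p xs ih =>
    rw [foldl_cons_omin] at h
    rcases hg : priorityDict.get? p with _ | rp <;> rw [hg] at h <;>
      rcases hrest : xs.foldl rankStep none with _ | rr <;> rw [hrest] at h <;>
      simp only [omin, Option.some.injEq, reduceCtorEq] at h
    · subst h
      obtain ⟨⟨q, hq, hqr⟩, hlb⟩ := ih hrest
      refine ⟨⟨q, List.mem_cons_of_mem p hq, hqr⟩, ?_⟩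
      intro q' hq' r' hr'
      rcases List.mem_cons.1 hq' with rfl | hq'
      · rw [hg] at hr'; exact absurd hr' (by simp)
      · exact hlb q' hq' r' hr'
    · subst h
      refine ⟨⟨p, List.mem_cons_self, hg⟩, ?_⟩
      intro q hq r' hr'
      rcases List.mem_cons.1 hq with rfl | hq
      · rw [hg] at hr'; injection hr' with h'; omega
      · rw [(foldl_none_iff xs).1 hrest q hq] at hr'; exact absurd hr' (by simp)
    · subst h
      obtain ⟨⟨q, hq, hqr⟩, hlb⟩ := ih hrest
      refine ⟨?_, ?_⟩
      · rcases le_total rp rr with hle | hle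
        · exact ⟨p, List.mem_cons_self, by rw [hg]; congr 1; omega⟩
        · exact ⟨q, List.mem_cons_of_mem p hq, by rw [hqr]; congr 1; omega⟩
      · intro q' hq' r' hr'
        rcases List.mem_cons.1 hq' with rfl | hq'
        · rw [hg] at hr'; injection hr' with h'; omega
        · have := hlb q' hq' r' hr'; omega

theorem foldl_rankStep_min (xs : List Int) (k : Int)
    (hex : ∃ p ∈ xs, priorityDict.get? p = some k)
    (hlb : ∀ q ∈ xs, ∀ r', priorityDict.get? q = some r' → k ≤ r') :
    xs.foldl rankStep none = some k := by
  rcases hres : xs.foldl rankStep none with _ | r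
  · obtain ⟨p, hp, hpk⟩ := hex
    rw [(foldl_none_iff xs).1 hres p hp] at hpk
    exact absurd hpk (by simp)
  · obtain ⟨⟨q, hq, hqr⟩, hmin⟩ := foldl_rankStep_bounds xs hres
    obtain ⟨p, hp, hpk⟩ := hex
    have h1 := hlb q hq r hqr
    have h2 := hmin p hp k hpk
    congr 1; omega

-- ===== VERDICT (by name: the statement is the Claim_ definition above) =====
set_option maxHeartbeats 1000000 in
theorem classify_spec : Claim_equal_classify := by
  intro xs _
  show classify xs = classify_alt xs
  rw [classify]
  simp only [List.any_cons, List.any_nil, List.contains_iff_mem, Bool.or_eq_true,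
    decide_eq_true_eq, Bool.false_eq_true, or_false]
  split_ifs with h1 h2 h3 h4 h5 h6 h7 h8 h9 h10 h11
  · have hm : xs.foldl rankStep none = some 0 :=
      foldl_rankStep_min xs 0 ⟨502, h1, rfl⟩
        (by
          intro q hq r' hr'
          rcases rank_mem hr' with ⟨rfl, rfl⟩ | ⟨rfl, rfl⟩ | ⟨rfl, rfl⟩ | ⟨rfl, rfl⟩ | ⟨rfl, rfl⟩ | ⟨rfl, rfl⟩ | ⟨rfl, rfl⟩ | ⟨rfl, rfl⟩ | ⟨rfl, rfl⟩ | ⟨rfl, rfl⟩ | ⟨rfl, rfl⟩ | ⟨rfl, rfl⟩ | ⟨rfl, rfl⟩ | ⟨rfl, rfl⟩ | ⟨rfl, rfl⟩ <;>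
            first | omega | tauto)
    simp [classify_alt, hm, PySem.List.pyGet?, PySem.List.pyIdx?, classLabels]
  · have hm : xs.foldl rankStep none = some 1 :=
      foldl_rankStep_min xs 1 ⟨20000, h2, rfl⟩
        (by
          intro q hq r' hr'
          rcases rank_mem hr' with ⟨rfl, rfl⟩ | ⟨rfl, rfl⟩ | ⟨rfl, rfl⟩ | ⟨rfl, rfl⟩ | ⟨rfl, rfl⟩ | ⟨rfl, rfl⟩ | ⟨rfl, rfl⟩ | ⟨rfl, rfl⟩ | ⟨rfl, rfl⟩ | ⟨rfl, rfl⟩ | ⟨rfl, rfl⟩ | ⟨rfl, rfl⟩ | ⟨rfl, rfl⟩ | ⟨rfl, rfl⟩ | ⟨rfl, rfl⟩ <;>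
            first | omega | tauto)
    simp [classify_alt, hm, PySem.List.pyGet?, PySem.List.pyIdx?, classLabels]
  · have hm : xs.foldl rankStep none = some 2 :=
      foldl_rankStep_min xs 2 ⟨47808, h3, rfl⟩
        (by
          intro q hq r' hr'
          rcases rank_mem hr' with ⟨rfl, rfl⟩ | ⟨rfl, rfl⟩ | ⟨rfl, rfl⟩ | ⟨rfl, rfl⟩ | ⟨rfl, rfl⟩ | ⟨rfl, rfl⟩ | ⟨rfl, rfl⟩ | ⟨rfl, rfl⟩ | ⟨rfl, rfl⟩ | ⟨rfl, rfl⟩ | ⟨rfl, rfl⟩ | ⟨rfl, rfl⟩ | ⟨rfl, rfl⟩ | ⟨rfl, rfl⟩ | ⟨rfl, rfl⟩ <;>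
            first | omega | tauto)
    simp [classify_alt, hm, PySem.List.pyGet?, PySem.List.pyIdx?, classLabels]
  · have hm : xs.foldl rankStep none = some 3 :=
      foldl_rankStep_min xs 3 ⟨44818, h4, rfl⟩
        (by
          intro q hq r' hr'
          rcases rank_mem hr' with ⟨rfl, rfl⟩ | ⟨rfl, rfl⟩ | ⟨rfl, rfl⟩ | ⟨rfl, rfl⟩ | ⟨rfl, rfl⟩ | ⟨rfl, rfl⟩ | ⟨rfl, rfl⟩ | ⟨rfl, rfl⟩ | ⟨rfl, rfl⟩ | ⟨rfl, rfl⟩ | ⟨rfl, rfl⟩ | ⟨rfl, rfl⟩ | ⟨rfl, rfl⟩ | ⟨rfl, rfl⟩ | ⟨rfl, rfl⟩ <;>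
            first | omega | tauto)
    simp [classify_alt, hm, PySem.List.pyGet?, PySem.List.pyIdx?, classLabels]
  · have hm : xs.foldl rankStep none = some 4 :=
      foldl_rankStep_min xs 4 ⟨1883, h5, rfl⟩
        (by
          intro q hq r' hr'
          rcases rank_mem hr' with ⟨rfl, rfl⟩ | ⟨rfl, rfl⟩ | ⟨rfl, rfl⟩ | ⟨rfl, rfl⟩ | ⟨rfl, rfl⟩ | ⟨rfl, rfl⟩ | ⟨rfl, rfl⟩ | ⟨rfl, rfl⟩ | ⟨rfl, rfl⟩ | ⟨rfl, rfl⟩ | ⟨rfl, rfl⟩ | ⟨rfl, rfl⟩ | ⟨rfl, rfl⟩ | ⟨rfl, rfl⟩ | ⟨rfl, rfl⟩ <;>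
            first | omega | tauto)
    simp [classify_alt, hm, PySem.List.pyGet?, PySem.List.pyIdx?, classLabels]
  · have hm : xs.foldl rankStep none = some 5 :=
      foldl_rankStep_min xs 5 ⟨8883, h6, rfl⟩
        (by
          intro q hq r' hr'
          rcases rank_mem hr' with ⟨rfl, rfl⟩ | ⟨rfl, rfl⟩ | ⟨rfl, rfl⟩ | ⟨rfl, rfl⟩ | ⟨rfl, rfl⟩ | ⟨rfl, rfl⟩ | ⟨rfl, rfl⟩ | ⟨rfl, rfl⟩ | ⟨rfl, rfl⟩ | ⟨rfl, rfl⟩ | ⟨rfl, rfl⟩ | ⟨rfl, rfl⟩ | ⟨rfl, rfl⟩ | ⟨rfl, rfl⟩ | ⟨rfl, rfl⟩ <;>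
            first | omega | tauto)
    simp [classify_alt, hm, PySem.List.pyGet?, PySem.List.pyIdx?, classLabels]
  · have hm : xs.foldl rankStep none = some 6 :=
      foldl_rankStep_min xs 6 ⟨554, h7, rfl⟩
        (by
          intro q hq r' hr'
          rcases rank_mem hr' with ⟨rfl, rfl⟩ | ⟨rfl, rfl⟩ | ⟨rfl, rfl⟩ | ⟨rfl, rfl⟩ | ⟨rfl, rfl⟩ | ⟨rfl, rfl⟩ | ⟨rfl, rfl⟩ | ⟨rfl, rfl⟩ | ⟨rfl, rfl⟩ | ⟨rfl, rfl⟩ | ⟨rfl, rfl⟩ | ⟨rfl, rfl⟩ | ⟨rfl, rfl⟩ | ⟨rfl, rfl⟩ | ⟨rfl, rfl⟩ <;>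
            first | omega | tauto)
    simp [classify_alt, hm, PySem.List.pyGet?, PySem.List.pyIdx?, classLabels]
  · obtain h8 | h8 := h8
    · have hm : xs.foldl rankStep none = some 7 :=
        foldl_rankStep_min xs 7 ⟨443, h8, rfl⟩
          (by
            intro q hq r' hr'
            rcases rank_mem hr' with ⟨rfl, rfl⟩ | ⟨rfl, rfl⟩ | ⟨rfl, rfl⟩ | ⟨rfl, rfl⟩ | ⟨rfl, rfl⟩ | ⟨rfl, rfl⟩ | ⟨rfl, rfl⟩ | ⟨rfl, rfl⟩ | ⟨rfl, rfl⟩ | ⟨rfl, rfl⟩ | ⟨rfl, rfl⟩ | ⟨rfl, rfl⟩ | ⟨rfl, rfl⟩ | ⟨rfl, rfl⟩ | ⟨rfl, rfl⟩ <;>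
              first | omega | tauto)
      simp [classify_alt, hm, PySem.List.pyGet?, PySem.List.pyIdx?, classLabels]
    · have hm : xs.foldl rankStep none = some 7 :=
        foldl_rankStep_min xs 7 ⟨8443, h8, rfl⟩
          (by
            intro q hq r' hr'
            rcases rank_mem hr' with ⟨rfl, rfl⟩ | ⟨rfl, rfl⟩ | ⟨rfl, rfl⟩ | ⟨rfl, rfl⟩ | ⟨rfl, rfl⟩ | ⟨rfl, rfl⟩ | ⟨rfl, rfl⟩ | ⟨rfl, rfl⟩ | ⟨rfl, rfl⟩ | ⟨rfl, rfl⟩ | ⟨rfl, rfl⟩ | ⟨rfl, rfl⟩ | ⟨rfl, rfl⟩ | ⟨rfl, rfl⟩ | ⟨rfl, rfl⟩ <;>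
              first | omega | tauto)
      simp [classify_alt, hm, PySem.List.pyGet?, PySem.List.pyIdx?, classLabels]
  · rcases h9 with h9 | h9 | h9 | h9
    · have hm : xs.foldl rankStep none = some 8 :=
        foldl_rankStep_min xs 8 ⟨80, h9, rfl⟩
          (by
            intro q hq r' hr'
            rcases rank_mem hr' with ⟨rfl, rfl⟩ | ⟨rfl, rfl⟩ | ⟨rfl, rfl⟩ | ⟨rfl, rfl⟩ | ⟨rfl, rfl⟩ | ⟨rfl, rfl⟩ | ⟨rfl, rfl⟩ | ⟨rfl, rfl⟩ | ⟨rfl, rfl⟩ | ⟨rfl, rfl⟩ | ⟨rfl, rfl⟩ | ⟨rfl, rfl⟩ | ⟨rfl, rfl⟩ | ⟨rfl, rfl⟩ | ⟨rfl, rfl⟩ <;>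
              first | omega | tauto)
      simp [classify_alt, hm, PySem.List.pyGet?, PySem.List.pyIdx?, classLabels]
    · have hm : xs.foldl rankStep none = some 8 :=
        foldl_rankStep_min xs 8 ⟨81, h9, rfl⟩
          (by
            intro q hq r' hr'
            rcases rank_mem hr' with ⟨rfl, rfl⟩ | ⟨rfl, rfl⟩ | ⟨rfl, rfl⟩ | ⟨rfl, rfl⟩ | ⟨rfl, rfl⟩ | ⟨rfl, rfl⟩ | ⟨rfl, rfl⟩ | ⟨rfl, rfl⟩ | ⟨rfl, rfl⟩ | ⟨rfl, rfl⟩ | ⟨rfl, rfl⟩ | ⟨rfl, rfl⟩ | ⟨rfl, rfl⟩ | ⟨rfl, rfl⟩ | ⟨rfl, rfl⟩ <;>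
              first | omega | tauto)
      simp [classify_alt, hm, PySem.List.pyGet?, PySem.List.pyIdx?, classLabels]
    · have hm : xs.foldl rankStep none = some 8 :=
        foldl_rankStep_min xs 8 ⟨8000, h9, rfl⟩
          (by
            intro q hq r' hr'
            rcases rank_mem hr' with ⟨rfl, rfl⟩ | ⟨rfl, rfl⟩ | ⟨rfl, rfl⟩ | ⟨rfl, rfl⟩ | ⟨rfl, rfl⟩ | ⟨rfl, rfl⟩ | ⟨rfl, rfl⟩ | ⟨rfl, rfl⟩ | ⟨rfl, rfl⟩ | ⟨rfl, rfl⟩ | ⟨rfl, rfl⟩ | ⟨rfl, rfl⟩ | ⟨rfl, rfl⟩ | ⟨rfl, rfl⟩ | ⟨rfl, rfl⟩ <;>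
              first | omega | tauto)
      simp [classify_alt, hm, PySem.List.pyGet?, PySem.List.pyIdx?, classLabels]
    · have hm : xs.foldl rankStep none = some 8 :=
        foldl_rankStep_min xs 8 ⟨8080, h9, rfl⟩
          (by
            intro q hq r' hr'
            rcases rank_mem hr' with ⟨rfl, rfl⟩ | ⟨rfl, rfl⟩ | ⟨rfl, rfl⟩ | ⟨rfl, rfl⟩ | ⟨rfl, rfl⟩ | ⟨rfl, rfl⟩ | ⟨rfl, rfl⟩ | ⟨rfl, rfl⟩ | ⟨rfl, rfl⟩ | ⟨rfl, rfl⟩ | ⟨rfl, rfl⟩ | ⟨rfl, rfl⟩ | ⟨rfl, rfl⟩ | ⟨rfl, rfl⟩ | ⟨rfl, rfl⟩ <;>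
              first | omega | tauto)
      simp [classify_alt, hm, PySem.List.pyGet?, PySem.List.pyIdx?, classLabels]
  · have hm : xs.foldl rankStep none = some 9 :=
      foldl_rankStep_min xs 9 ⟨23, h10, rfl⟩
        (by
          intro q hq r' hr'
          rcases rank_mem hr' with ⟨rfl, rfl⟩ | ⟨rfl, rfl⟩ | ⟨rfl, rfl⟩ | ⟨rfl, rfl⟩ | ⟨rfl, rfl⟩ | ⟨rfl, rfl⟩ | ⟨rfl, rfl⟩ | ⟨rfl, rfl⟩ | ⟨rfl, rfl⟩ | ⟨rfl, rfl⟩ | ⟨rfl, rfl⟩ | ⟨rfl, rfl⟩ | ⟨rfl, rfl⟩ | ⟨rfl, rfl⟩ | ⟨rfl, rfl⟩ <;>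
            first | omega | tauto)
    simp [classify_alt, hm, PySem.List.pyGet?, PySem.List.pyIdx?, classLabels]
  · have hm : xs.foldl rankStep none = some 10 :=
      foldl_rankStep_min xs 10 ⟨22, h11, rfl⟩
        (by
          intro q hq r' hr'
          rcases rank_mem hr' with ⟨rfl, rfl⟩ | ⟨rfl, rfl⟩ | ⟨rfl, rfl⟩ | ⟨rfl, rfl⟩ | ⟨rfl, rfl⟩ | ⟨rfl, rfl⟩ | ⟨rfl, rfl⟩ | ⟨rfl, rfl⟩ | ⟨rfl, rfl⟩ | ⟨rfl, rfl⟩ | ⟨rfl, rfl⟩ | ⟨rfl, rfl⟩ | ⟨rfl, rfl⟩ | ⟨rfl, rfl⟩ | ⟨rfl, rfl⟩ <;>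
            first | omega | tauto)
    simp [classify_alt, hm, PySem.List.pyGet?, PySem.List.pyIdx?, classLabels]
  · have hn : xs.foldl rankStep none = none := by
      refine (foldl_none_iff xs).2 ?_
      intro q hq
      rcases hopt : priorityDict.get? q with _ | r
      · rfl
      · exfalso
        rcases rank_mem hopt with ⟨rfl, rfl⟩ | ⟨rfl, rfl⟩ | ⟨rfl, rfl⟩ | ⟨rfl, rfl⟩ | ⟨rfl, rfl⟩ | ⟨rfl, rfl⟩ | ⟨rfl, rfl⟩ | ⟨rfl, rfl⟩ | ⟨rfl, rfl⟩ | ⟨rfl, rfl⟩ | ⟨rfl, rfl⟩ | ⟨rfl, rfl⟩ | ⟨rfl, rfl⟩ | ⟨rfl, rfl⟩ | ⟨rfl, rfl⟩ <;> tauto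
    simp [classify_alt, hn]
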